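-- pv_equiv track=rewrite | github.com/zero-shubham/encrypter-decrypter | enc_dec_project_v2.py | enrule
-- ===== SOURCE A (Python) =====
-- def enrule(lst_key):
--     counter=0
--     lst_encRULE= list()
--     lst_encCHAR= list()
--     for z in lst_key:
--         if (counter % 2 == 0):
--             if (z % 2 == 0):
--                 lst_encRULE.append(0)
--
--
--             elif (z % 2 != 0):
--                 lst_encRULE.append(1)
--
--         else:
--             lst_encCHAR.append(z)
--
--         counter = counter + 1
--
--     return (lst_encCHAR,lst_encRULE)
-- ===== SOURCE B (Python) =====
-- def enrule(lst_key):
--     # Pairwise consumption: take elements two at a time; the first of each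
--     # pair yields its parity flag (a % 2 is already 0/1 for ints), the
--     # second is copied verbatim. No counter, no index-parity branch.
--     it = iter(lst_key)
--     lst_encRULE = []
--     lst_encCHAR = []
--     for a in it:
--         lst_encRULE.append(a % 2)
--         b = next(it, None)
--         if b is not None:
--             lst_encCHAR.append(b)
--     return (lst_encCHAR, lst_encRULE)
-- ===== Notes on version B (the rewrite author's own statement) =====
-- stated objective: simpler
-- what changed: Replaces the counter-and-parity-branch single loop by pairwise consumption of the list (two elements per step): the first of each pair contributes a%2 directly as the flag, the second is copied, so the counter and both branches disappear.
import Mathlib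
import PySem

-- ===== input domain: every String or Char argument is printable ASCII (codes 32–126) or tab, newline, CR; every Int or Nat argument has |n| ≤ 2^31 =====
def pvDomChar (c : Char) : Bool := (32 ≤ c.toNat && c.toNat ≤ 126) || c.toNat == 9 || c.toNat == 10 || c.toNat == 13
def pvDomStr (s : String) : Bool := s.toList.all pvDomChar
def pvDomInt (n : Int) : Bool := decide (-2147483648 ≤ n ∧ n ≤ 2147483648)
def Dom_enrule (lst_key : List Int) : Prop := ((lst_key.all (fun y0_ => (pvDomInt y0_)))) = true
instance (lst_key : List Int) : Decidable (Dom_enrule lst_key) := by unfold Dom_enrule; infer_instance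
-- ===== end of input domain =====

-- B drops A's counter and index-parity branch: it consumes the list two elements
-- at a time, emitting a % 2 for the first of each pair and copying the second.

-- ===== PORT A =====
-- one loop step of A: state is (counter, lst_encRULE, lst_encCHAR)
def enruleStep (st : Int × List Int × List Int) (z : Int) : Int × List Int × List Int :=
  let counter := st.1
  let rule := st.2.1
  let char := st.2.2
  if PySem.Int.mod counter 2 = 0 then
    if PySem.Int.mod z 2 = 0 then (counter + 1, rule ++ [0], char)
    else (counter + 1, rule ++ [1], char)
  else (counter + 1, rule, char ++ [z])

def enrule (lst_key : List Int) : List Int × List Int :=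
  let s := lst_key.foldl enruleStep (0, [], [])
  (s.2.2, s.2.1)

-- ===== PORT B =====
-- the for-loop over the iterator consuming two elements per step
def enruleGo (xs : List Int) (rules chars : List Int) : List Int × List Int :=
  match xs with
  | [] => (chars, rules)
  | [a] => (chars, rules ++ [PySem.Int.mod a 2])
  | a :: b :: rest => enruleGo rest (rules ++ [PySem.Int.mod a 2]) (chars ++ [b])

def enrule_alt (lst_key : List Int) : List Int × List Int :=
  enruleGo lst_key [] []

-- ===== PRECONDITION & SPEC =====
def Spec_enrule (lst_key : List Int) (out : List Int × List Int) : Prop := out = enrule_alt lst_key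
instance (lst_key : List Int) (out : List Int × List Int) : Decidable (Spec_enrule lst_key out) := by unfold Spec_enrule; infer_instance

-- ===== CLAIM (what is proved, stated in full; the proofs are below) =====
def Claim_equal_enrule : Prop := ∀ (lst_key : List Int), Dom_enrule lst_key → Spec_enrule lst_key (enrule lst_key)

-- ===== LEMMAS AND PROOFS =====
theorem mod2_flag (z : Int) : PySem.Int.mod z 2 = if z % 2 = 0 then 0 else 1 := by
  rw [PySem.Int.mod_eq_emod_of_pos (by norm_num)]
  omega

theorem enrule_loop (xs : List Int) (R C : List Int) :
    ∀ (c : Int), c % 2 = 0 →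
    ((xs.foldl enruleStep (c, R, C)).2.2, (xs.foldl enruleStep (c, R, C)).2.1)
      = enruleGo xs R C := by
  induction xs, R, C using enruleGo.induct with
  | case1 => intro c hc; simp [enruleGo]
  | case2 R C a =>
    intro c hc
    have h1 : (2 : Int) ∣ c := by omega
    simp only [List.foldl, enruleGo, enruleStep, mod2_flag]
    split_ifs <;> simp_all
  | case3 R C a b rest ih =>
    intro c hc
    have h1 : (2 : Int) ∣ c := by omega
    have h2 : ¬ ((2 : Int) ∣ (c + 1)) := by omega
    simp only [List.foldl]
    rw [show enruleStep (c, R, C) a = (c + 1, R ++ [PySem.Int.mod a 2], C) by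
          simp only [enruleStep, mod2_flag]
          split_ifs <;> simp_all,
        show enruleStep (c + 1, R ++ [PySem.Int.mod a 2], C) b
            = (c + 1 + 1, R ++ [PySem.Int.mod a 2], C ++ [b]) by
          simp [enruleStep, h2]]
    rw [enruleGo]
    exact ih _ (by omega)

-- ===== VERDICT (by name: the statement is the Claim_ definition above) =====
theorem enrule_spec : Claim_equal_enrule := by
  intro lst_key _
  unfold Spec_enrule enrule enrule_alt
  simpa using enrule_loop lst_key [] [] 0 (by decide)
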